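-- pv_equiv track=rewrite | github.com/zhiyanliu/autogluon-assistant | src/autogluon/assistant/tools_registry/utils.py | extract_title_from_markdown
-- ===== SOURCE A (Python) =====
-- def extract_title_from_markdown(body: str) -> str:
--     """Best-effort tutorial title extraction.
--
--     Returns the first markdown header (`#`-prefixed line) found in `body`,
--     with `#` prefix and surrounding bold markers (`**`) stripped.
--
--     Why "first header" and not just "first non-empty line": tutorial files
--     commonly start with YAML frontmatter (--- ... ---), HTML comments, badge
--     images, or a previously stamped `Summary: ...` paragraph. Naively taking
--     the first line yields garbage like "---" or "Summary: ..." for those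
--     cases. The first markdown header is a much more robust signal of the
--     tutorial's actual subject.
--
--     Falls back to the first non-empty line if no header is found, and to
--     "Tutorial" if the body is entirely empty.
--
--     Args:
--         body: Tutorial markdown content (may include frontmatter, etc).
--
--     Returns:
--         A clean title string suitable for use in headings like
--         "# Condensed: <title>".
--     """
--     lines = body.splitlines()
--     # Prefer the first markdown header.
--     for line in lines:
--         s = line.strip()
--         if s.startswith("#"):
--             return s.lstrip("#").strip().strip("*").strip()
--     # Fallback: first non-empty line.
--     for line in lines:
--         s = line.strip()
--         if s:
--             return s.lstrip("#").strip()
--     return "Tutorial"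
-- ===== SOURCE B (Python) =====
-- def extract_title_from_markdown(body: str) -> str:
--     """Single pass: return at the first header; remember the first non-empty
--     line as a fallback; 'Tutorial' if neither exists."""
--     fallback = None
--     for line in body.splitlines():
--         s = line.strip()
--         if s.startswith("#"):
--             return s.lstrip("#").strip().strip("*").strip()
--         if s and fallback is None:
--             fallback = s.lstrip("#").strip()
--     return fallback if fallback is not None else "Tutorial"
-- ===== Notes on version B (the rewrite author's own statement) =====
-- stated objective: simpler
-- what changed: Merges A's two sequential scans over the lines into a single pass that records the first non-empty line as a fallback while searching for the first header.
import Mathlib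
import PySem

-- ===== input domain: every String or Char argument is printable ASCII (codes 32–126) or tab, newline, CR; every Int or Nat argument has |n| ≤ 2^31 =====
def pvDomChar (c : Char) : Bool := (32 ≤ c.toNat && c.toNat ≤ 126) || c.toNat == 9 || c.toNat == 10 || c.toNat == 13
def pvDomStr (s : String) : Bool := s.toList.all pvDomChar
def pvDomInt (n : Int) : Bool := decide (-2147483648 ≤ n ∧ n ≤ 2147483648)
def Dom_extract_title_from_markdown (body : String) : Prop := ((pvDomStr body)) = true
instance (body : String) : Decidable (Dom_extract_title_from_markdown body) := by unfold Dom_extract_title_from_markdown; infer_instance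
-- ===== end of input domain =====

-- B merges A's two scans into one pass carrying the fallback; same value everywhere (objective: simpler).

-- ===== PORT A =====
-- s.lstrip("#"): hand port, exact — a single-character strip set is dropWhile on the leading chars
def pvLstripHash (s : String) : String := String.ofList (s.toList.dropWhile (· == '#'))

-- first loop of A: first header line's cleaned title
def pvA_loop1 : List String → Option String
  | [] => none
  | line :: rest =>
    let s := PySem.Str.strip line
    if PySem.Str.startswith s "#" then
      some (PySem.Str.strip (PySem.Str.stripChars (PySem.Str.strip (pvLstripHash s)) "*"))
    else pvA_loop1 rest

-- second loop of A: first non-empty line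
def pvA_loop2 : List String → Option String
  | [] => none
  | line :: rest =>
    let s := PySem.Str.strip line
    if s ≠ "" then some (PySem.Str.strip (pvLstripHash s))
    else pvA_loop2 rest

def extract_title_from_markdown (body : String) : String :=
  let lines := PySem.Str.splitlines body
  match pvA_loop1 lines with
  | some t => t
  | none =>
    match pvA_loop2 lines with
    | some t => t
    | none => "Tutorial"

-- ===== PORT B =====
-- single pass with a fallback accumulator (Source B's loop)
def pvB_loop : List String → Option String → String
  | [], fb => fb.getD "Tutorial"
  | line :: rest, fb =>
    let s := PySem.Str.strip line
    if PySem.Str.startswith s "#" then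
      PySem.Str.strip (PySem.Str.stripChars (PySem.Str.strip (pvLstripHash s)) "*")
    else if s ≠ "" ∧ fb = none then
      pvB_loop rest (some (PySem.Str.strip (pvLstripHash s)))
    else pvB_loop rest fb

def extract_title_from_markdown_alt (body : String) : String :=
  pvB_loop (PySem.Str.splitlines body) none

-- ===== PRECONDITION & SPEC =====
def Spec_extract_title_from_markdown (body : String) (out : String) : Prop := out = extract_title_from_markdown_alt body
instance (body : String) (out : String) : Decidable (Spec_extract_title_from_markdown body out) := by unfold Spec_extract_title_from_markdown; infer_instance

-- ===== CLAIM (what is proved, stated in full; the proofs are below) =====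
def Claim_equal_extract_title_from_markdown : Prop := ∀ (body : String), Dom_extract_title_from_markdown body → Spec_extract_title_from_markdown body (extract_title_from_markdown body)

-- ===== LEMMAS AND PROOFS =====
-- loop invariant: the one-pass loop equals "loop1, else the carried fallback, else loop2, else Tutorial"
theorem pvB_loop_eq (lines : List String) : ∀ fb : Option String,
    pvB_loop lines fb =
      match pvA_loop1 lines with
      | some t => t
      | none =>
        match fb with
        | some f => f
        | none =>
          match pvA_loop2 lines with
          | some t => t
          | none => "Tutorial" := by
  induction lines with
  | nil => intro fb; cases fb <;> rfl
  | cons line rest ih =>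
    intro fb
    simp only [pvB_loop, pvA_loop1, pvA_loop2]
    by_cases hh : PySem.Str.startswith (PySem.Str.strip line) "#" = true
    · rw [if_pos hh, if_pos hh]
    · rw [if_neg hh, if_neg hh]
      by_cases hs : PySem.Str.strip line = ""
      · simp [hs, ih]
      · cases fb with
        | none => simp [hs, ih]
        | some f => simp [hs, ih]

-- ===== VERDICT (by name: the statement is the Claim_ definition above) =====
theorem extract_title_from_markdown_spec : Claim_equal_extract_title_from_markdown := by
  intro body _
  unfold Spec_extract_title_from_markdown extract_title_from_markdown extract_title_from_markdown_alt
  rw [pvB_loop_eq]
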